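-- pv_equiv track=rewrite | github.com/multiformats/py-multiaddr | multiaddr/resolvers/util.py | is_fqdn
-- ===== SOURCE A (Python) =====
-- def is_fqdn(s: str) -> bool:
--     """Check if string is a fully qualified domain name (ends with unescaped dot).
--
--     """
--     if not s:
--         return False
--     # Count trailing backslashes before the final character
--     if s[-1] != ".":
--         return False
--     # Check if the trailing dot is escaped
--     num_backslashes = 0
--     for i in range(len(s) - 2, -1, -1):
--         if s[i] == "\\":
--             num_backslashes += 1
--         else:
--             break
--     # Odd number of backslashes means the dot is escaped
--     return num_backslashes % 2 == 0
-- ===== SOURCE B (Python) =====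
-- def is_fqdn(s: str) -> bool:
--     """Check if string is a fully qualified domain name (ends with unescaped dot)."""
--     if not s:
--         return False
--     escaped = False
--     for ch in s[:-1]:
--         escaped = (not escaped) and ch == "\\"
--     return s[-1] == "." and not escaped
-- ===== Notes on version B (the rewrite author's own statement) =====
-- stated objective: alternative
-- what changed: Replaces A's backward scan that counts the trailing backslash run and tests its parity with a forward single pass maintaining an escape-state boolean over all but the last character.
import Mathlib
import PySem

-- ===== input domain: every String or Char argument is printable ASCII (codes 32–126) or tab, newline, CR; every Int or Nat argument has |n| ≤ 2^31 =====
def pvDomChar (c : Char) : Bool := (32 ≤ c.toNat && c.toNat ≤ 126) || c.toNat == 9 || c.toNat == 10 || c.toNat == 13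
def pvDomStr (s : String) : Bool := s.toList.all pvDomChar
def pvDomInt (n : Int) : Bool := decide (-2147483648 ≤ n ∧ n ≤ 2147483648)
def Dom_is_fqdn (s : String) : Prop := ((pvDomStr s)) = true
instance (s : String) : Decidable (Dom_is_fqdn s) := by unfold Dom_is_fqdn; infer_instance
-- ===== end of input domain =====

-- B replaces A's backward count of the trailing backslash run by a forward
-- single pass maintaining an escape-state boolean (alternative decomposition, same cost).

-- ===== PORT A =====
-- A's loop 'for i in range(len(s)-2, -1, -1): if s[i]=="\\": count+=1 else: break'
-- walks backwards from the char before the last, counting consecutive backslashes;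
-- ported as a recursion over the reversed prefix (same characters, same order).
def isFqdnCount : List Char → Int
  | [] => 0
  | c :: rest => if c = '\\' then 1 + isFqdnCount rest else 0

def is_fqdn (s : String) : Bool :=
  let l := s.toList
  if l.isEmpty then false
  else if l.getLast? ≠ some '.' then false
  else decide (PySem.Int.mod (isFqdnCount l.dropLast.reverse) 2 = 0)

-- ===== PORT B =====
def is_fqdn_alt (s : String) : Bool :=
  let l := s.toList
  if l.isEmpty then false
  else
    let esc := l.dropLast.foldl (fun e c => !e && (c == '\\')) false
    (l.getLast? == some '.') && !esc

-- ===== PRECONDITION & SPEC =====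
def Spec_is_fqdn (s : String) (out : Bool) : Prop := out = is_fqdn_alt s
instance (s : String) (out : Bool) : Decidable (Spec_is_fqdn s out) := by unfold Spec_is_fqdn; infer_instance

-- ===== CLAIM (what is proved, stated in full; the proofs are below) =====
def Claim_equal_is_fqdn : Prop := ∀ (s : String), Dom_is_fqdn s → Spec_is_fqdn s (is_fqdn s)

-- ===== LEMMAS AND PROOFS =====

-- The forward 'escaped' flag after a list equals: the trailing backslash run has odd length.
lemma flag_eq_parity (m : List Char) :
    m.foldl (fun e c => !e && (c == '\\')) false
      = decide (PySem.Int.mod (isFqdnCount m.reverse) 2 = 1) := by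
  induction m using List.reverseRecOn with
  | nil => decide
  | append_singleton m c ih =>
    rw [List.foldl_append, List.foldl_cons, List.foldl_nil, ih,
        List.reverse_append]
    simp only [List.reverse_singleton, List.singleton_append, isFqdnCount]
    have hnn : 0 ≤ isFqdnCount m.reverse := by
      induction m.reverse with
      | nil => simp [isFqdnCount]
      | cons a t ih2 => simp only [isFqdnCount]; split_ifs <;> omega
    rw [PySem.Int.mod_eq_emod_of_pos (by norm_num : (0:Int) < 2),
        PySem.Int.mod_eq_emod_of_pos (by norm_num : (0:Int) < 2)]
    by_cases hc : c = '\\'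
    · simp only [hc, beq_self_eq_true, Bool.and_true]
      rcases Int.emod_two_eq_zero_or_one (isFqdnCount m.reverse) with h | h
      · have h1 : (1 + isFqdnCount m.reverse) % 2 = 1 := by omega
        simp [h, h1]
      · have h1 : (1 + isFqdnCount m.reverse) % 2 = 0 := by omega
        simp [h, h1]
    · simp [hc]

lemma count_nonneg (m : List Char) : 0 ≤ isFqdnCount m := by
  induction m with
  | nil => simp [isFqdnCount]
  | cons a t ih => simp only [isFqdnCount]; split_ifs <;> omega

-- ===== VERDICT (by name: the statement is the Claim_ definition above) =====
theorem is_fqdn_spec : Claim_equal_is_fqdn := by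
  intro s _
  unfold Spec_is_fqdn is_fqdn is_fqdn_alt
  simp only []
  by_cases he : s.toList.isEmpty
  · simp [he]
  · rw [if_neg he, if_neg he, flag_eq_parity]
    by_cases hl : s.toList.getLast? = some '.'
    · have h2 : (s.toList.getLast? == some '.') = true := by simp [hl]
      rw [if_neg (by simp [hl]), h2, Bool.true_and]
      have := count_nonneg s.toList.dropLast.reverse
      rcases Int.emod_two_eq_zero_or_one (isFqdnCount s.toList.dropLast.reverse) with h | h <;>
        · rw [PySem.Int.mod_eq_emod_of_pos (by norm_num : (0:Int) < 2)] at *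
          simp [h]
    · rw [if_pos (by simp [hl])]
      simp [hl]
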